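-- pv_equiv track=rewrite | github.com/JazzikPeng/Algorithm-in-Python | 476. 石子归并.py | get_range_sum
-- ===== SOURCE A (Python) =====
-- def get_range_sum(A):
--     n = len(A)
--
--     range_sum = [[0] * n for _ in range(len(A))]
--
--     for i in range(n):
--         range_sum[i][i] = A[i]
--
--     for i in range(n):
--         for j in range(i + 1, n):
--             range_sum[i][j] = range_sum[i][j-1] + A[j]
--
--     return range_sum
-- ===== SOURCE B (Python) =====
-- def get_range_sum(A):
--     n = len(A)
--     prefix = [0]
--     s = 0
--     for x in A:
--         s += x
--         prefix.append(s)
--     return [[prefix[j + 1] - prefix[i] if j >= i else 0 for j in range(n)]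
--             for i in range(n)]
-- ===== Notes on version B (the rewrite author's own statement) =====
-- stated objective: alternative
-- what changed: B precomputes a 1-D prefix-sum array once and fills each cell as a difference of two prefixes, replacing A's in-place row-by-row incremental accumulation over a preallocated matrix; same O(n^2) cost, different structure.
import Mathlib
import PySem

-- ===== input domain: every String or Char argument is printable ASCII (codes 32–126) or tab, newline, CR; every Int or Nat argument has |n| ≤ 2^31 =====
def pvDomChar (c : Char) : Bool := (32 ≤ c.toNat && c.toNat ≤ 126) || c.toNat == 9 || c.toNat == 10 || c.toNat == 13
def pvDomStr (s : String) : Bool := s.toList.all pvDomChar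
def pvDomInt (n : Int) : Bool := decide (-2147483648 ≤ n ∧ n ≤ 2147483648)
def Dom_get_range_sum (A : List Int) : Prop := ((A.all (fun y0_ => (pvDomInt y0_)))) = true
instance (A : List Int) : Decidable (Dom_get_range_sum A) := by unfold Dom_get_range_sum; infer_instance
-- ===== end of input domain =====

-- B replaces A's in-place row-by-row incremental accumulation over a preallocated
-- matrix by a single 1-D prefix-sum pass plus a difference-of-prefixes table fill.

-- ===== PORT A =====
-- Loop indices i, j of `range(n)` / `range(i+1, n)` are ported as Nat (they are all
-- nonnegative and in range, so `List.getD` at an in-range index is exactly Python's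
-- A[j] / range_sum[i][j], and Nat `j-1` agrees with Python's `j-1` since j ≥ 1).
def get_range_sum (A : List Int) : List (List Int) :=
  let n := A.length
  let rs0 : List (List Int) := (List.range n).map (fun _ => List.replicate n (0 : Int))
  let rs1 := (List.range n).foldl
      (fun rs i => rs.set i ((rs.getD i []).set i (A.getD i 0))) rs0
  (List.range n).foldl
      (fun rs i =>
        (List.range' (i+1) (n - (i+1))).foldl
          (fun rs j =>
            rs.set i ((rs.getD i []).set j ((rs.getD i []).getD (j-1) 0 + A.getD j 0)))
          rs)
      rs1

-- ===== PORT B =====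
-- port of Source B: one prefix-sum pass (list `prefix`, running total s), then the
-- table is produced as a nested comprehension of prefix differences.
def get_range_sum_alt (A : List Int) : List (List Int) :=
  let n := A.length
  let pre := (A.foldl (fun ps x => (ps.1 ++ [ps.2 + x], ps.2 + x)) (([0] : List Int), (0 : Int))).1
  (List.range n).map (fun i =>
    (List.range n).map (fun j =>
      if j ≥ i then pre.getD (j+1) 0 - pre.getD i 0 else 0))

-- ===== PRECONDITION & SPEC =====
def Spec_get_range_sum (A : List Int) (out : List (List Int)) : Prop := out = get_range_sum_alt A
instance (A : List Int) (out : List (List Int)) : Decidable (Spec_get_range_sum A out) := by unfold Spec_get_range_sum; infer_instance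

-- ===== CLAIM (what is proved, stated in full; the proofs are below) =====
def Claim_equal_get_range_sum : Prop := ∀ (A : List Int), Dom_get_range_sum A → Spec_get_range_sum A (get_range_sum A)

-- ===== LEMMAS AND PROOFS =====

-- set on a range-map is a pointwise update
theorem pv_set_rangeMap {α : Type} {n a : Nat} (f : Nat → α) (v : α) (_ha : a < n) :
    ((List.range n).map f).set a v = (List.range n).map (fun m => if m = a then v else f m) := by
  apply List.ext_getElem
  · simp
  · intro m h1 h2
    simp only [List.getElem_set, List.getElem_map, List.getElem_range]
    by_cases h : a = m
    · subst h; simp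
    · rw [if_neg h, if_neg (fun hma => h hma.symm)]

theorem pv_getD_rangeMap {α : Type} {n a : Nat} (f : Nat → α) (d : α) (ha : a < n) :
    ((List.range n).map f).getD a d = f a := by
  simp [List.getD, ha]

theorem pv_getD_set_self {α : Type} (l : List α) (i : Nat) (v : α) (d : α) (h : i < l.length) :
    (l.set i v).getD i d = v := by
  simp [List.getD, h]

theorem pv_take_sum_succ (A : List Int) (m : Nat) (hm : m < A.length) :
    (A.take (m+1)).sum = (A.take m).sum + A.getD m 0 := by
  rw [List.getD_eq_getElem _ _ hm, List.take_add_one, List.sum_append]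
  simp [List.getElem?_eq_getElem hm]

-- a fold that only rewrites row i equals one set of row i
theorem pv_foldl_row_local (l : List Nat) (i : Nat) (step : Nat → List Int → List Int) :
    ∀ rs : List (List Int), i < rs.length →
      l.foldl (fun rs j => rs.set i (step j (rs.getD i []))) rs
        = rs.set i (l.foldl (fun r j => step j r) (rs.getD i [])) := by
  induction l with
  | nil =>
      intro rs h
      simp only [List.foldl_nil]
      rw [List.getD_eq_getElem _ _ h, List.set_getElem_self]
  | cons j l ih =>
      intro rs h
      simp only [List.foldl_cons]
      rw [ih _ (by simpa using h),
          pv_getD_set_self _ _ _ _ h, List.set_set]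

-- a fold over range' a k whose body sets row i from row i turns a range-map into a range-map
theorem pv_foldl_rows (n : Nat) (G : Nat → List Int → List Int)
    (F : List (List Int) → Nat → List (List Int))
    (hF : ∀ rs i, rs.length = n → i < n → F rs i = rs.set i (G i (rs.getD i []))) :
    ∀ (k a : Nat) (f : Nat → List Int), a + k ≤ n →
      (List.range' a k).foldl F ((List.range n).map f)
        = (List.range n).map (fun m => if a ≤ m ∧ m < a + k then G m (f m) else f m) := by
  intro k
  induction k with
  | zero =>
      intro a f h
      simp only [List.range'_zero, List.foldl_nil]
      apply List.map_congr_left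
      intro m hm
      rw [if_neg (by omega)]
  | succ t ih =>
      intro a f h
      rw [List.range'_succ, List.foldl_cons,
          hF _ _ (by simp) (by omega),
          pv_getD_rangeMap f [] (by omega),
          pv_set_rangeMap f _ (by omega),
          ih (a+1) _ (by omega)]
      apply List.map_congr_left
      intro m hm
      rw [List.mem_range] at hm
      by_cases hma : m = a
      · subst hma
        rw [if_neg (by omega), if_pos rfl, if_pos (by omega)]
      · simp only [if_neg hma]
        by_cases hc : a + 1 ≤ m ∧ m < a + 1 + t
        · rw [if_pos hc, if_pos (by omega)]
        · rw [if_neg hc, if_neg (by omega)]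

-- inner-loop invariant: extending a partially-filled row by one prefix difference
theorem pv_row_fill (A : List Int) (n i : Nat) (hn : n = A.length) (_hi : i < n) :
    ∀ (t b : Nat), i ≤ b → b + t < n →
      (List.range' (b+1) t).foldl
          (fun r j => r.set j (r.getD (j-1) 0 + A.getD j 0))
          ((List.range n).map (fun m =>
            if i ≤ m ∧ m ≤ b then (A.take (m+1)).sum - (A.take i).sum else 0))
        = (List.range n).map (fun m =>
            if i ≤ m ∧ m ≤ b + t then (A.take (m+1)).sum - (A.take i).sum else 0) := by
  intro t
  induction t with
  | zero => intro b _ _; simp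
  | succ t ih =>
      intro b hb hbt
      rw [List.range'_succ, List.foldl_cons]
      have hb1 : b + 1 < n := by omega
      rw [pv_getD_rangeMap _ (0 : Int) (show b + 1 - 1 < n by omega)]
      have hstep :
          ((List.range n).map (fun m =>
            if i ≤ m ∧ m ≤ b then (A.take (m+1)).sum - (A.take i).sum else 0)).set (b+1)
              ((if i ≤ b + 1 - 1 ∧ b + 1 - 1 ≤ b then (A.take (b+1-1+1)).sum - (A.take i).sum else 0)
                + A.getD (b+1) 0)
            = (List.range n).map (fun m =>
                if i ≤ m ∧ m ≤ b + 1 then (A.take (m+1)).sum - (A.take i).sum else 0) := by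
        rw [pv_set_rangeMap _ _ hb1]
        apply List.map_congr_left
        intro m hm
        rw [List.mem_range] at hm
        by_cases hmb : m = b + 1
        · subst hmb
          have hbb : b + 1 - 1 = b := by omega
          rw [if_pos rfl, hbb, if_pos ⟨hb, le_refl b⟩,
              if_pos (⟨by omega, le_refl _⟩ : i ≤ b + 1 ∧ b + 1 ≤ b + 1)]
          have h2 := pv_take_sum_succ A (b+1) (by omega)
          omega
        · rw [if_neg hmb]
          by_cases hc : i ≤ m ∧ m ≤ b
          · rw [if_pos hc, if_pos (by omega)]
          · rw [if_neg hc, if_neg (by omega)]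
      rw [hstep]
      have h3 : b + (t + 1) = b + 1 + t := by omega
      rw [h3]
      exact ih (b+1) (by omega) (by omega)

-- B-side: the prefix list built by the fold
def pvScan (s : Int) : List Int → List Int
  | [] => []
  | x :: l => (s + x) :: pvScan (s + x) l

theorem pv_foldl_pre (l : List Int) :
    ∀ (p : List Int) (s : Int),
      l.foldl (fun ps x => (ps.1 ++ [ps.2 + x], ps.2 + x)) (p, s)
        = (p ++ pvScan s l, s + l.sum) := by
  induction l with
  | nil => intro p s; simp [pvScan]
  | cons x l ih =>
      intro p s
      rw [List.foldl_cons, ih]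
      simp [pvScan, List.sum_cons]
      ring

theorem pv_scan_getD (l : List Int) :
    ∀ (s : Int) (m : Nat), m < l.length →
      (pvScan s l).getD m 0 = s + (l.take (m+1)).sum := by
  induction l with
  | nil => intro s m h; simp at h
  | cons x l ih =>
      intro s m h
      cases m with
      | zero => simp [pvScan]
      | succ m =>
          simp only [pvScan, List.getD, List.getElem?_cons_succ]
          have := ih (s + x) m (by simpa using h)
          simp only [List.getD] at this
          rw [this]
          simp [List.sum_cons]
          ring

theorem pv_pre_getD (A : List Int) (m : Nat) (hm : m ≤ A.length) :
    ((0 : Int) :: pvScan 0 A).getD m 0 = (A.take m).sum := by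
  cases m with
  | zero => simp
  | succ m =>
      simp only [List.getD, List.getElem?_cons_succ]
      have := pv_scan_getD A 0 m (by omega)
      simp only [List.getD] at this
      rw [this]
      simp

-- specialisation of pv_foldl_rows to a full `List.range n` loop
theorem pv_foldl_rows0 (n : Nat) (G : Nat → List Int → List Int)
    (F : List (List Int) → Nat → List (List Int))
    (hF : ∀ rs i, rs.length = n → i < n → F rs i = rs.set i (G i (rs.getD i [])))
    (f : Nat → List Int) :
    (List.range n).foldl F ((List.range n).map f)
      = (List.range n).map (fun m => if 0 ≤ m ∧ m < 0 + n then G m (f m) else f m) := by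
  have := pv_foldl_rows n G F hF n 0 f (by omega)
  rw [← List.range_eq_range'] at this
  exact this

-- main equality of the two ports
theorem pv_main (A : List Int) : get_range_sum A = get_range_sum_alt A := by
  have hpre := pv_foldl_pre A [0] 0
  simp only [get_range_sum, get_range_sum_alt, hpre, List.singleton_append]
  rw [pv_foldl_rows0 A.length (fun i r => r.set i (A.getD i 0))
        (fun rs i => rs.set i ((rs.getD i []).set i (A.getD i 0)))
        (fun rs i _ _ => rfl)
        (fun _ => List.replicate A.length (0 : Int)),
      pv_foldl_rows0 A.length
        (fun i r => (List.range' (i+1) (A.length - (i+1))).foldl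
            (fun r j => r.set j (r.getD (j-1) 0 + A.getD j 0)) r)
        (fun rs i =>
          (List.range' (i+1) (A.length - (i+1))).foldl
            (fun rs j =>
              rs.set i ((rs.getD i []).set j ((rs.getD i []).getD (j-1) 0 + A.getD j 0))) rs)
        (by intro rs i h1 h2
            exact pv_foldl_row_local (List.range' (i+1) (A.length - (i+1))) i
              (fun j r => r.set j (r.getD (j-1) 0 + A.getD j 0)) rs (by omega))
        _]
  apply List.map_congr_left
  intro i hi
  rw [List.mem_range] at hi
  rw [if_pos ⟨Nat.zero_le i, by omega⟩, if_pos ⟨Nat.zero_le i, by omega⟩]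
  -- the row that loop 1 left at index i, as a range-map
  have hbase : (List.replicate A.length (0 : Int)).set i (A.getD i 0)
      = (List.range A.length).map (fun m =>
          if i ≤ m ∧ m ≤ i then (A.take (m+1)).sum - (A.take i).sum else 0) := by
    have hrep : (List.range A.length).map (fun _ => (0 : Int)) = List.replicate A.length 0 := by
      simp
    rw [← hrep, pv_set_rangeMap _ _ hi]
    apply List.map_congr_left
    intro m hm
    rw [List.mem_range] at hm
    by_cases hmi : m = i
    · subst hmi
      rw [if_pos rfl, if_pos ⟨le_refl m, le_refl m⟩]
      have := pv_take_sum_succ A m (by omega)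
      omega
    · rw [if_neg hmi, if_neg (by omega)]
  rw [hbase, pv_row_fill A A.length i rfl hi (A.length - (i+1)) i (le_refl i) (by omega)]
  apply List.map_congr_left
  intro j hj
  rw [List.mem_range] at hj
  by_cases hij : i ≤ j
  · rw [if_pos ⟨hij, by omega⟩, if_pos hij,
        pv_pre_getD A (j+1) (by omega), pv_pre_getD A i (by omega)]
  · rw [if_neg (by omega), if_neg hij]

-- ===== VERDICT (by name: the statement is the Claim_ definition above) =====
theorem get_range_sum_spec : Claim_equal_get_range_sum := by
  intro A _
  unfold Spec_get_range_sum
  exact pv_main A
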